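-- pv_equiv track=rewrite | github.com/CMCFame/SofaTracker | src/team_mappings.py | find_team_name
-- ===== SOURCE A (Python) =====
-- TEAM_MAPPINGS = {
--     # Liga MX
--     'Liga MX': {
--         'Monterrey': ['Rayados', 'CF Monterrey', 'MONTERREY'],
--         'América': ['Club América', 'America', 'AMERICA'],
--         'Pachuca': ['Tuzos', 'Club Pachuca', 'PACHUCA'],
--         'Guadalajara': ['Chivas', 'Club Deportivo Guadalajara', 'CHIVAS'],
--         'Cruz Azul': ['Cruz Azul FC', 'CRUZ AZUL'],
--         'Tigres UANL': ['Tigres', 'UANL', 'TIGRES'],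
--         'Santos': ['Santos Laguna', 'SANTOS'],
--         'León': ['Club León', 'LEON'],
--         'Toluca': ['Diablos Rojos', 'Toluca FC', 'TOLUCA'],
--         'Puebla': ['Club Puebla', 'PUEBLA']
--     },
--
--     # Liga Expansion MX
--     'Liga Expansion MX': {
--         'Atlético San Luis': ['San Luis', 'SAN LUIS'],
--         'Tampico Madero': ['Tampico', 'TAMPICO'],
--         'Cancún FC': ['Cancun', 'CANCUN']
--     },
--
--     # Liga Femenil MX
--     'Liga Femenil MX': {
--         'Tigres Femenil': ['Tigres UANL Femenil', 'TIGRES FEMENIL'],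
--         'América Femenil': ['Club América Femenil', 'AMERICA FEMENIL'],
--         'Guadalajara Femenil': ['Chivas Femenil', 'CHIVAS FEMENIL']
--     },
--
--     # La Liga (Spain)
--     'La Liga': {
--         'Real Madrid': ['Madrid', 'Real', 'REAL MADRID'],
--         'Barcelona': ['Barça', 'Barca', 'FC Barcelona', 'BARCELONA'],
--         'Atlético Madrid': ['Atletico', 'Atleti', 'ATLETICO MADRID'],
--         'Sevilla': ['Sevilla FC', 'SEVILLA']
--     },
--
--     # Other Leagues (partial list for brevity)
--     'Premier League': {
--         'Manchester City': ['Man City', 'City', 'MANCHESTER CITY'],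
--         'Manchester United': ['Man Utd', 'United', 'MANCHESTER UNITED'],
--         'Liverpool': ['LFC', 'LIVERPOOL'],
--         'Arsenal': ['ARSENAL']
--     },
--
--     # Brasileirão
--     'Brasileirão': {
--         'Flamengo': ['Mengão', 'FLAMENGO'],
--         'Palmeiras': ['Verdão', 'PALMEIRAS'],
--         'São Paulo': ['SPFC', 'SAO PAULO'],
--         'Corinthians': ['CORINTHIANS']
--     }
-- }
--
-- def find_team_name(team_name: str, league: str = None) -> str:
--     """
--     Find the canonical team name across different variations
--
--     Args:
--         team_name (str): Team name to match
--         league (str, optional): Specific league to search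
--
--     Returns:
--         str: Canonical team name or original input if no match found
--     """
--     # Normalize input
--     normalized_name = team_name.strip().upper()
--
--     # If league is specified, search that league first
--     if league and league in TEAM_MAPPINGS:
--         for canonical_name, variations in TEAM_MAPPINGS[league].items():
--             if normalized_name in [v.upper() for v in variations] or \
--                normalized_name == canonical_name.upper():
--                 return canonical_name
--
--     # Search across all leagues if no league specified or no match found
--     for league_teams in TEAM_MAPPINGS.values():
--         for canonical_name, variations in league_teams.items():
--             if normalized_name in [v.upper() for v in variations] or \
--                normalized_name == canonical_name.upper():
--                 return canonical_name
--
--     # Return original name if no match found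
--     return team_name
-- ===== SOURCE B (Python) =====
-- TEAM_MAPPINGS = {
--     'Liga MX': {
--         'Monterrey': ['Rayados', 'CF Monterrey', 'MONTERREY'],
--         'América': ['Club América', 'America', 'AMERICA'],
--         'Pachuca': ['Tuzos', 'Club Pachuca', 'PACHUCA'],
--         'Guadalajara': ['Chivas', 'Club Deportivo Guadalajara', 'CHIVAS'],
--         'Cruz Azul': ['Cruz Azul FC', 'CRUZ AZUL'],
--         'Tigres UANL': ['Tigres', 'UANL', 'TIGRES'],
--         'Santos': ['Santos Laguna', 'SANTOS'],
--         'León': ['Club León', 'LEON'],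
--         'Toluca': ['Diablos Rojos', 'Toluca FC', 'TOLUCA'],
--         'Puebla': ['Club Puebla', 'PUEBLA']
--     },
--     'Liga Expansion MX': {
--         'Atlético San Luis': ['San Luis', 'SAN LUIS'],
--         'Tampico Madero': ['Tampico', 'TAMPICO'],
--         'Cancún FC': ['Cancun', 'CANCUN']
--     },
--     'Liga Femenil MX': {
--         'Tigres Femenil': ['Tigres UANL Femenil', 'TIGRES FEMENIL'],
--         'América Femenil': ['Club América Femenil', 'AMERICA FEMENIL'],
--         'Guadalajara Femenil': ['Chivas Femenil', 'CHIVAS FEMENIL']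
--     },
--     'La Liga': {
--         'Real Madrid': ['Madrid', 'Real', 'REAL MADRID'],
--         'Barcelona': ['Barça', 'Barca', 'FC Barcelona', 'BARCELONA'],
--         'Atlético Madrid': ['Atletico', 'Atleti', 'ATLETICO MADRID'],
--         'Sevilla': ['Sevilla FC', 'SEVILLA']
--     },
--     'Premier League': {
--         'Manchester City': ['Man City', 'City', 'MANCHESTER CITY'],
--         'Manchester United': ['Man Utd', 'United', 'MANCHESTER UNITED'],
--         'Liverpool': ['LFC', 'LIVERPOOL'],
--         'Arsenal': ['ARSENAL']
--     },
--     'Brasileirão': {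
--         'Flamengo': ['Mengão', 'FLAMENGO'],
--         'Palmeiras': ['Verdão', 'PALMEIRAS'],
--         'São Paulo': ['SPFC', 'SAO PAULO'],
--         'Corinthians': ['CORINTHIANS']
--     }
-- }
--
--
-- def _build_index(teams, index=None):
--     """Reverse index: UPPER-cased canonical name and every variation -> canonical
--     name; first occurrence wins (keys already present are never overwritten)."""
--     if index is None:
--         index = {}
--     for canonical, variations in teams.items():
--         for key in [canonical] + variations:
--             k = key.upper()
--             if k not in index:
--                 index[k] = canonical
--     return index
--
--
-- # Precomputed at module load: one reverse index per league, and one combined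
-- # index over all leagues in order (so earlier leagues win on duplicates).
-- _LEAGUE_INDEX = {lg: _build_index(teams) for lg, teams in TEAM_MAPPINGS.items()}
-- _GLOBAL_INDEX = {}
-- for _teams in TEAM_MAPPINGS.values():
--     _build_index(_teams, _GLOBAL_INDEX)
--
--
-- def find_team_name(team_name: str, league: str = None) -> str:
--     normalized = team_name.strip().upper()
--     if league and league in _LEAGUE_INDEX:
--         hit = _LEAGUE_INDEX[league].get(normalized)
--         if hit is not None:
--             return hit
--     hit = _GLOBAL_INDEX.get(normalized)
--     return hit if hit is not None else team_name
-- ===== Notes on version B (the rewrite author's own statement) =====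
-- stated objective: idiomatic
-- what changed: B precomputes once, at module load, per-league and global reverse-lookup dicts mapping every upper-cased variation/canonical name to its canonical name (first occurrence wins), so each call is a strip/upper plus at most two dict lookups instead of nested scans that re-uppercase every variation list.
import Mathlib
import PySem

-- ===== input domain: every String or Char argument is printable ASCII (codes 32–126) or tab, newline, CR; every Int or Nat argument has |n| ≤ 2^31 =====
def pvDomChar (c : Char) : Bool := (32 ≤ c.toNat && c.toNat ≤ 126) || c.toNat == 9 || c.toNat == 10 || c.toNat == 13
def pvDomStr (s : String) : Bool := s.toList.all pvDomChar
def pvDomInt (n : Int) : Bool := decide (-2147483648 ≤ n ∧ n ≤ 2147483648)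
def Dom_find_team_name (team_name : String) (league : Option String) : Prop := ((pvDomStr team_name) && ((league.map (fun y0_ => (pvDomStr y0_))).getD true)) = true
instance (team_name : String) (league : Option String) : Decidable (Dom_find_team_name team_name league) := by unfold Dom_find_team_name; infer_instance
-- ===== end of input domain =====

-- B replaces A's repeated nested scans over the variation lists by reverse-lookup
-- dicts (per league and global) precomputed once at module load (idiomatic/alternative).

-- ===== PORT A =====
-- TEAM_MAPPINGS: dict of dicts, as an association list (insertion order).
def pvTable : List (String × List (String × List String)) :=
  [ ("Liga MX",
      [ ("Monterrey", ["Rayados", "CF Monterrey", "MONTERREY"]),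
        ("América", ["Club América", "America", "AMERICA"]),
        ("Pachuca", ["Tuzos", "Club Pachuca", "PACHUCA"]),
        ("Guadalajara", ["Chivas", "Club Deportivo Guadalajara", "CHIVAS"]),
        ("Cruz Azul", ["Cruz Azul FC", "CRUZ AZUL"]),
        ("Tigres UANL", ["Tigres", "UANL", "TIGRES"]),
        ("Santos", ["Santos Laguna", "SANTOS"]),
        ("León", ["Club León", "LEON"]),
        ("Toluca", ["Diablos Rojos", "Toluca FC", "TOLUCA"]),
        ("Puebla", ["Club Puebla", "PUEBLA"]) ]),
    ("Liga Expansion MX",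
      [ ("Atlético San Luis", ["San Luis", "SAN LUIS"]),
        ("Tampico Madero", ["Tampico", "TAMPICO"]),
        ("Cancún FC", ["Cancun", "CANCUN"]) ]),
    ("Liga Femenil MX",
      [ ("Tigres Femenil", ["Tigres UANL Femenil", "TIGRES FEMENIL"]),
        ("América Femenil", ["Club América Femenil", "AMERICA FEMENIL"]),
        ("Guadalajara Femenil", ["Chivas Femenil", "CHIVAS FEMENIL"]) ]),
    ("La Liga",
      [ ("Real Madrid", ["Madrid", "Real", "REAL MADRID"]),
        ("Barcelona", ["Barça", "Barca", "FC Barcelona", "BARCELONA"]),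
        ("Atlético Madrid", ["Atletico", "Atleti", "ATLETICO MADRID"]),
        ("Sevilla", ["Sevilla FC", "SEVILLA"]) ]),
    ("Premier League",
      [ ("Manchester City", ["Man City", "City", "MANCHESTER CITY"]),
        ("Manchester United", ["Man Utd", "United", "MANCHESTER UNITED"]),
        ("Liverpool", ["LFC", "LIVERPOOL"]),
        ("Arsenal", ["ARSENAL"]) ]),
    ("Brasileirão",
      [ ("Flamengo", ["Mengão", "FLAMENGO"]),
        ("Palmeiras", ["Verdão", "PALMEIRAS"]),
        ("São Paulo", ["SPFC", "SAO PAULO"]),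
        ("Corinthians", ["CORINTHIANS"]) ]) ]

-- the inner for-loop with early return: first (canonical, variations) entry matching
def pvScanTeams (n : String) : List (String × List String) → Option String
  | [] => none
  | (c, vs) :: rest =>
      if n ∈ vs.map PySem.Str.upper ∨ n = PySem.Str.upper c then some c
      else pvScanTeams n rest

-- the outer for-loop over TEAM_MAPPINGS.values()
def pvScanAll (n : String) : List (String × List (String × List String)) → Option String
  | [] => none
  | (_, teams) :: rest =>
      match pvScanTeams n teams with
      | some c => some c
      | none => pvScanAll n rest

-- 'league in TEAM_MAPPINGS' + 'TEAM_MAPPINGS[league]' (first-match assoc lookup)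
def pvLookupLeague : List (String × List (String × List String)) → String → Option (List (String × List String))
  | [], _ => none
  | (lg, teams) :: rest, l => if lg = l then some teams else pvLookupLeague rest l

def find_team_name (team_name : String) (league : Option String) : String :=
  let normalized_name := PySem.Str.upper (PySem.Str.strip team_name)
  let leagueHit : Option String :=
    match league with
    | none => none
    | some l =>
        if l ≠ "" then
          match pvLookupLeague pvTable l with
          | some teams => pvScanTeams normalized_name teams
          | none => none
        else none
  match leagueHit with
  | some c => c
  | none =>
      match pvScanAll normalized_name pvTable with
      | some c => c
      | none => team_name

-- ===== PORT B =====
-- 'if k not in index: index[k] = canonical'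
def pvInsertAbsent (d : PySem.Dict String String) (k v : String) : PySem.Dict String String :=
  if d.contains k then d else d.insert k v

-- _build_index: reverse index, first occurrence wins
def pvBuildIndex (teams : List (String × List String)) (d : PySem.Dict String String) : PySem.Dict String String :=
  teams.foldl (fun d p => (p.1 :: p.2).foldl (fun d key => pvInsertAbsent d (PySem.Str.upper key) p.1) d) d

-- _LEAGUE_INDEX = {lg: _build_index(teams) for lg, teams in TEAM_MAPPINGS.items()}
def pvLeagueIndex : List (String × PySem.Dict String String) :=
  pvTable.map (fun p => (p.1, pvBuildIndex p.2 PySem.Dict.empty))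

-- _GLOBAL_INDEX built over all leagues in order
def pvGlobalIndex : PySem.Dict String String :=
  pvTable.foldl (fun d p => pvBuildIndex p.2 d) PySem.Dict.empty

-- 'league in _LEAGUE_INDEX' + '_LEAGUE_INDEX[league]' (first-match assoc lookup)
def pvLookupIdx : List (String × PySem.Dict String String) → String → Option (PySem.Dict String String)
  | [], _ => none
  | (lg, idx) :: rest, l => if lg = l then some idx else pvLookupIdx rest l

def find_team_name_alt (team_name : String) (league : Option String) : String :=
  let normalized := PySem.Str.upper (PySem.Str.strip team_name)
  let hit1 : Option String :=
    match league with
    | none => none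
    | some l =>
        if l ≠ "" then
          match pvLookupIdx pvLeagueIndex l with
          | some idx => idx.get? normalized
          | none => none
        else none
  match hit1 with
  | some c => c
  | none =>
      match pvGlobalIndex.get? normalized with
      | some c => c
      | none => team_name

-- ===== PRECONDITION & SPEC =====
def Spec_find_team_name (team_name : String) (league : Option String) (out : String) : Prop := out = find_team_name_alt team_name league
instance (team_name : String) (league : Option String) (out : String) : Decidable (Spec_find_team_name team_name league out) := by unfold Spec_find_team_name; infer_instance

-- ===== CLAIM (what is proved, stated in full; the proofs are below) =====
def Claim_equal_find_team_name : Prop := ∀ (team_name : String) (league : Option String), Dom_find_team_name team_name league → Spec_find_team_name team_name league (find_team_name team_name league)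

-- ===== LEMMAS AND PROOFS =====

theorem get?_pvInsertAbsent (d : PySem.Dict String String) (k v n : String) :
    (pvInsertAbsent d k v).get? n = (d.get? n).or (if n = k then some v else none) := by
  unfold pvInsertAbsent
  by_cases hc : d.contains k = true
  · rw [if_pos hc]
    by_cases hn : n = k
    · subst hn
      rw [PySem.Dict.contains_eq_isSome_get?] at hc
      cases h : d.get? n with
      | none => rw [h] at hc; simp at hc
      | some a => simp
    · simp [hn]
  · rw [if_neg hc, PySem.Dict.get?_insert]
    by_cases hn : n = k
    · subst hn
      rw [PySem.Dict.contains_eq_isSome_get?] at hc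
      cases h : d.get? n with
      | none => simp
      | some a => rw [h] at hc; simp at hc
    · simp [hn]

theorem get?_fold_keys (keys : List String) (c n : String) (d : PySem.Dict String String) :
    (keys.foldl (fun d key => pvInsertAbsent d (PySem.Str.upper key) c) d).get? n =
      (d.get? n).or (if n ∈ keys.map PySem.Str.upper then some c else none) := by
  induction keys generalizing d with
  | nil => simp
  | cons k rest ih =>
      simp only [List.foldl_cons, ih, get?_pvInsertAbsent, Option.or_assoc, List.map_cons,
        List.mem_cons]
      congr 1
      by_cases h1 : n = PySem.Str.upper k <;> by_cases h2 : n ∈ rest.map PySem.Str.upper <;>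
        simp [h1, h2]

theorem get?_pvBuildIndex (teams : List (String × List String)) (n : String)
    (d : PySem.Dict String String) :
    (pvBuildIndex teams d).get? n = (d.get? n).or (pvScanTeams n teams) := by
  induction teams generalizing d with
  | nil => simp only [pvBuildIndex, List.foldl_nil, pvScanTeams, Option.or_none]
  | cons p rest ih =>
      obtain ⟨c, vs⟩ := p
      simp only [pvBuildIndex] at *
      rw [List.foldl_cons, ih, get?_fold_keys, Option.or_assoc]
      show _ = (d.get? n).or (if n ∈ vs.map PySem.Str.upper ∨ n = PySem.Str.upper c then some c
        else pvScanTeams n rest)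
      congr 1
      by_cases h1 : n = PySem.Str.upper c <;> by_cases h2 : n ∈ vs.map PySem.Str.upper <;>
        simp [List.map_cons, List.mem_cons, h1, h2]

theorem get?_global_fold (tbl : List (String × List (String × List String))) (n : String)
    (d : PySem.Dict String String) :
    (tbl.foldl (fun d p => pvBuildIndex p.2 d) d).get? n = (d.get? n).or (pvScanAll n tbl) := by
  induction tbl generalizing d with
  | nil => simp [pvScanAll]
  | cons p rest ih =>
      obtain ⟨lg, teams⟩ := p
      simp only [List.foldl_cons, ih, get?_pvBuildIndex, Option.or_assoc]
      congr 1
      simp only [pvScanAll]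
      cases pvScanTeams n teams <;> simp

theorem pvGlobalIndex_eq (n : String) : pvGlobalIndex.get? n = pvScanAll n pvTable := by
  rw [pvGlobalIndex, get?_global_fold]
  simp

theorem pvLookupIdx_map (tbl : List (String × List (String × List String))) (l : String) :
    pvLookupIdx (tbl.map (fun p => (p.1, pvBuildIndex p.2 PySem.Dict.empty))) l =
      (pvLookupLeague tbl l).map (fun teams => pvBuildIndex teams PySem.Dict.empty) := by
  induction tbl with
  | nil => simp [pvLookupIdx, pvLookupLeague]
  | cons p rest ih =>
      obtain ⟨lg, teams⟩ := p
      simp only [List.map_cons, pvLookupIdx, pvLookupLeague]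
      by_cases h : lg = l <;> simp [h, ih]

-- ===== VERDICT (by name: the statement is the Claim_ definition above) =====
theorem find_team_name_spec : Claim_equal_find_team_name := by
  intro team_name league _
  unfold Spec_find_team_name find_team_name find_team_name_alt
  simp only []
  have hglob := pvGlobalIndex_eq (PySem.Str.upper (PySem.Str.strip team_name))
  have hli := pvLookupIdx_map pvTable
  cases league with
  | none => simp [hglob]
  | some l =>
      by_cases hl : l = ""
      · simp [hl, hglob]
      · simp only [hl, ne_eq, not_false_iff, if_true]
        rw [pvLeagueIndex, hli l]
        cases h : pvLookupLeague pvTable l with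
        | none => simp [hglob]
        | some teams =>
            simp only [Option.map_some]
            rw [get?_pvBuildIndex]
            simp only [PySem.Dict.get?_empty, Option.none_or]
            cases pvScanTeams (PySem.Str.upper (PySem.Str.strip team_name)) teams <;> simp [hglob]
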